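-- pv_equiv track=rewrite | github.com/pypi-data/pypi-mirror-111 | packages/laok/laok-0.2.11.tar.gz/laok-0.2.11/laok/core/kstr.py | index_list_remove_in_range
-- ===== SOURCE A (Python) =====
-- def index_list_remove_in_range(s, idx_list, range_start, range_end):
--     '''删除范围内的索引
--     :param s:
--     :param idx_list: 索引列表
--     :param range_start: 起始符号
--     :param range_end: 结束符号
--     :return: 剔除了不需要的索引
--     '''
--     if not idx_list:
--         return idx_list
--     ret_list = idx_list[:]
--     i_start = -1
--     i_end = -1
--
--     while 1:
--         i_start = s.find(range_start, i_start+1)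
--         i_end = s.find(range_end, i_end+1)
--
--         if i_start == -1 or i_end == -1:
--             break
--
--         for i in range(len(ret_list) - 1, -1, -1):
--             if i_start < ret_list[i] < i_end:
--                 ret_list.pop(i)
--
--     return ret_list
-- ===== SOURCE B (Python) =====
-- # B: collect all (start,end) occurrence pairs once, merge them into disjoint
-- # open intervals, then filter idx_list in a single pass (alternative algorithm:
-- # one filtering pass instead of one backward pop-scan per range pair).
-- def index_list_remove_in_range(s, idx_list, range_start, range_end):
--     if not idx_list:
--         return idx_list
--
--     def occurrences(pat):
--         out = []
--         i = s.find(pat, 0)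
--         while i != -1:
--             out.append(i)
--             i = s.find(pat, i + 1)
--         return out
--
--     merged = []
--     cur = None
--     for a, b in zip(occurrences(range_start), occurrences(range_end)):
--         if cur is None:
--             cur = (a, b)
--         elif a < cur[1]:
--             if b > cur[1]:
--                 cur = (cur[0], b)
--         else:
--             merged.append(cur)
--             cur = (a, b)
--     if cur is not None:
--         merged.append(cur)
--     return [x for x in idx_list if not any(a < x < b for a, b in merged)]
-- ===== Notes on version B (the rewrite author's own statement) =====
-- stated objective: alternative
-- what changed: B scans the string once to collect all (start,end) occurrence pairs, merges them into disjoint open intervals, and filters idx_list in a single pass, instead of A's backward pop-scan of the whole list for every range pair.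
import Mathlib
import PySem

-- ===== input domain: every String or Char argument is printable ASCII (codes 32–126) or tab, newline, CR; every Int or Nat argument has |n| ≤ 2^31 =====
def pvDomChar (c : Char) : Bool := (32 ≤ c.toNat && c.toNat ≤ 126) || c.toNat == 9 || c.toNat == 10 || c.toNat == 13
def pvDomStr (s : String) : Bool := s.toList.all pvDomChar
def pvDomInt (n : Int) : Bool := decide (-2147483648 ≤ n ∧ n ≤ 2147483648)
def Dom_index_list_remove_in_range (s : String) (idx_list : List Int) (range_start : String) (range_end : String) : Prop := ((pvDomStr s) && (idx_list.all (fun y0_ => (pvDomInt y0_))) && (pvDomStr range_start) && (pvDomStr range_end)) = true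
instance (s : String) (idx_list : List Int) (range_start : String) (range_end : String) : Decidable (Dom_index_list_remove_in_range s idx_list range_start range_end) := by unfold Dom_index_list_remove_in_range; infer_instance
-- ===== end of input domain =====

-- B collects the (start,end) pairs once, merges them into disjoint open intervals and
-- filters idx_list in a single pass, instead of A's one backward pop-scan per pair
-- (objective: alternative algorithm, single filtering pass).

-- ===== PORT A =====
-- the backward `for i in range(len(ret_list)-1, -1, -1): … pop(i)` loop: the element at
-- each position is kept/dropped with the tail already processed (exactly the descending scan)
def pvPopRange (a b : Int) : List Int → List Int
  | [] => []
  | x :: xs =>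
    let rest := pvPopRange a b xs
    if a < x ∧ x < b then rest else x :: rest

-- the `while 1:` loop; fuel s.length + 2 bounds its iteration count (i_start strictly
-- increases and stays ≤ len(s), so the break is always reached within the fuel)
def pvAWhile (s range_start range_end : String) : Nat → Int → Int → List Int → List Int
  | 0, _, _, ret => ret
  | fuel+1, iStart, iEnd, ret =>
    let iStart' := PySem.Str.findFrom s range_start (iStart + 1)
    let iEnd' := PySem.Str.findFrom s range_end (iEnd + 1)
    if iStart' = -1 ∨ iEnd' = -1 then ret
    else pvAWhile s range_start range_end fuel iStart' iEnd' (pvPopRange iStart' iEnd' ret)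

def index_list_remove_in_range (s : String) (idx_list : List Int) (range_start : String) (range_end : String) : List Int :=
  if idx_list = [] then idx_list
  else pvAWhile s range_start range_end (s.length + 2) (-1) (-1) idx_list

-- ===== PORT B =====
-- Source B's `occurrences` while loop (same fuel bound as A's loop: positions strictly increase)
def pvOccGo (s pat : String) : Nat → Int → List Int
  | 0, _ => []
  | fuel+1, i =>
    if i = -1 then []
    else i :: pvOccGo s pat fuel (PySem.Str.findFrom s pat (i + 1))

def pvOccurrences (s pat : String) : List Int :=
  pvOccGo s pat (s.length + 2) (PySem.Str.findFrom s pat 0)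

-- Source B's `for a, b in zip(…)` merge loop with state (merged, cur)
def pvMergeLoop : List (Int × Int) → List (Int × Int) → Option (Int × Int) → List (Int × Int) × Option (Int × Int)
  | [], done, cur => (done, cur)
  | (a, b) :: ps, done, cur =>
    match cur with
    | none => pvMergeLoop ps done (some (a, b))
    | some c =>
      if a < c.2 then
        if b > c.2 then pvMergeLoop ps done (some (c.1, b))
        else pvMergeLoop ps done (some c)
      else pvMergeLoop ps (done ++ [c]) (some (a, b))

-- Source B's trailing `if cur is not None: merged.append(cur)`
def pvFlush : List (Int × Int) × Option (Int × Int) → List (Int × Int)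
  | (done, none) => done
  | (done, some c) => done ++ [c]

def index_list_remove_in_range_alt (s : String) (idx_list : List Int) (range_start : String) (range_end : String) : List Int :=
  if idx_list = [] then idx_list
  else
    let merged := pvFlush (pvMergeLoop (List.zip (pvOccurrences s range_start) (pvOccurrences s range_end)) [] none)
    idx_list.filter fun x => !(merged.any fun p => decide (p.1 < x) && decide (x < p.2))

-- ===== PRECONDITION & SPEC =====
def Spec_index_list_remove_in_range (s : String) (idx_list : List Int) (range_start : String) (range_end : String) (out : List Int) : Prop := out = index_list_remove_in_range_alt s idx_list range_start range_end
instance (s : String) (idx_list : List Int) (range_start : String) (range_end : String) (out : List Int) : Decidable (Spec_index_list_remove_in_range s idx_list range_start range_end out) := by unfold Spec_index_list_remove_in_range; infer_instance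

-- ===== CLAIM (what is proved, stated in full; the proofs are below) =====
def Claim_equal_index_list_remove_in_range : Prop := ∀ (s : String) (idx_list : List Int) (range_start : String) (range_end : String), Dom_index_list_remove_in_range s idx_list range_start range_end → Spec_index_list_remove_in_range s idx_list range_start range_end (index_list_remove_in_range s idx_list range_start range_end)

-- ===== LEMMAS AND PROOFS =====

-- "some pair strictly contains x" — the predicate both final filters decide
def pvInP (ps : List (Int × Int)) (x : Int) : Bool :=
  ps.any fun p => decide (p.1 < x) && decide (x < p.2)

-- A's pair stream: the successive (i_start, i_end) values of the while loop
def pvPairs (s range_start range_end : String) : Nat → Int → Int → List (Int × Int)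
  | 0, _, _ => []
  | fuel+1, iStart, iEnd =>
    let iStart' := PySem.Str.findFrom s range_start (iStart + 1)
    let iEnd' := PySem.Str.findFrom s range_end (iEnd + 1)
    if iStart' = -1 ∨ iEnd' = -1 then []
    else (iStart', iEnd') :: pvPairs s range_start range_end fuel iStart' iEnd'

theorem pvPopRange_eq_filter (a b : Int) (l : List Int) :
    pvPopRange a b l = l.filter fun x => !(decide (a < x) && decide (x < b)) := by
  induction l with
  | nil => rfl
  | cons x xs ih =>
    simp only [pvPopRange, ih, List.filter_cons]
    by_cases h1 : a < x <;> by_cases h2 : x < b <;> simp [h1, h2]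

theorem pvAWhile_eq_foldl (s rs re : String) :
    ∀ (fuel : Nat) (iS iE : Int) (ret : List Int),
      pvAWhile s rs re fuel iS iE ret =
        (pvPairs s rs re fuel iS iE).foldl (fun r p => pvPopRange p.1 p.2 r) ret := by
  intro fuel
  induction fuel with
  | zero => intro iS iE ret; rfl
  | succ n ih =>
    intro iS iE ret
    simp only [pvAWhile, pvPairs]
    split
    · rfl
    · simp [ih]

theorem pvFoldl_pop_eq_filter :
    ∀ (ps : List (Int × Int)) (ret : List Int),
      ps.foldl (fun r p => pvPopRange p.1 p.2 r) ret = ret.filter fun x => !pvInP ps x := by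
  intro ps
  induction ps with
  | nil => intro ret; simp [pvInP]
  | cons p ps ih =>
    intro ret
    rw [List.foldl_cons, ih, pvPopRange_eq_filter, List.filter_filter]
    apply List.filter_congr
    intro x _
    simp only [pvInP, List.any_cons, Bool.not_or, Bool.not_and]
    exact Bool.and_comm _ _

theorem pvPairs_eq_zip (s rs re : String) :
    ∀ (fuel : Nat) (iS iE : Int),
      pvPairs s rs re fuel iS iE =
        List.zip (pvOccGo s rs fuel (PySem.Str.findFrom s rs (iS + 1)))
                 (pvOccGo s re fuel (PySem.Str.findFrom s re (iE + 1))) := by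
  intro fuel
  induction fuel with
  | zero => intro iS iE; rfl
  | succ n ih =>
    intro iS iE
    simp only [pvPairs, pvOccGo]
    by_cases h1 : PySem.Str.findFrom s rs (iS + 1) = -1 <;>
      by_cases h2 : PySem.Str.findFrom s re (iE + 1) = -1 <;>
        (simp only [PySem.Str.findFrom_eq] at h1 h2 ⊢; simp [h1, h2, ih])

-- findFrom at a nonnegative start returns -1 or an index ≥ the start
theorem pvFindFrom_ge (s pat : String) (k : Int) (hk : 0 ≤ k) :
    PySem.Str.findFrom s pat k = -1 ∨ k ≤ PySem.Str.findFrom s pat k := by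
  simp only [PySem.Str.findFrom_eq, PySem.Chars.findFrom]
  have hk' : ¬ k < 0 := by omega
  simp only [if_neg hk']
  by_cases h1 : (↑s.toList.length : Int) < k
  · simp only [if_pos h1]; simp
  · simp only [if_neg h1]
    by_cases h2 : PySem.Chars.find (List.drop k.toNat (List.take (↑s.toList.length : Int).toNat s.toList)) pat.toList = -1
    · simp only [if_pos h2]; simp
    · simp only [if_neg h2]
      have h := PySem.Chars.neg_one_le_find (List.drop k.toNat (List.take (↑s.toList.length : Int).toNat s.toList)) pat.toList
      right; omega

theorem pvOccGo_neg_one (s pat : String) (fuel : Nat) : pvOccGo s pat fuel (-1) = [] := by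
  cases fuel <;> simp [pvOccGo]

theorem pvOccGo_mem_ge (s pat : String) :
    ∀ (fuel : Nat) (i : Int), -1 ≤ i → ∀ x ∈ pvOccGo s pat fuel i, i ≤ x := by
  intro fuel
  induction fuel with
  | zero => intro i _ x hx; simp [pvOccGo] at hx
  | succ n ih =>
    intro i hi x hx
    simp only [pvOccGo] at hx
    by_cases h : i = -1
    · simp [h] at hx
    · simp only [h, if_false, List.mem_cons] at hx
      rcases hx with rfl | hx
      · omega
      · rcases pvFindFrom_ge s pat (i + 1) (by omega) with hf | hf
        · rw [hf, pvOccGo_neg_one] at hx; simp at hx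
        · have := ih (PySem.Str.findFrom s pat (i + 1)) (by omega) x hx
          omega

theorem pvOccGo_pairwise (s pat : String) :
    ∀ (fuel : Nat) (i : Int), -1 ≤ i → List.Pairwise (· < ·) (pvOccGo s pat fuel i) := by
  intro fuel
  induction fuel with
  | zero => intro i _; simp [pvOccGo]
  | succ n ih =>
    intro i hi
    simp only [pvOccGo]
    by_cases h : i = -1
    · simp [h]
    · simp only [h, if_false, List.pairwise_cons]
      rcases pvFindFrom_ge s pat (i + 1) (by omega) with hf | hf
      · rw [hf, pvOccGo_neg_one]; simp
      · refine ⟨fun x hx => ?_, ih _ (by omega)⟩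
        have := pvOccGo_mem_ge s pat n (PySem.Str.findFrom s pat (i + 1)) (by omega) x hx
        omega

theorem pvZip_pairwise {xs ys : List Int} (h : List.Pairwise (· < ·) xs) :
    List.Pairwise (fun p q : Int × Int => p.1 < q.1) (List.zip xs ys) := by
  induction xs generalizing ys with
  | nil => simp
  | cons x xs ih =>
    cases ys with
    | nil => simp
    | cons y ys =>
      rw [List.pairwise_cons] at h
      simp only [List.zip_cons_cons, List.pairwise_cons]
      refine ⟨fun q hq => ?_, ih h.2⟩
      exact h.1 q.1 (List.of_mem_zip hq).1

theorem pvMergeLoop_sem :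
    ∀ (ps done : List (Int × Int)) (cur : Option (Int × Int)) (x : Int),
      List.Pairwise (fun p q : Int × Int => p.1 < q.1) ps →
      (∀ c, cur = some c → ∀ p ∈ ps, c.1 < p.1) →
      pvInP (pvFlush (pvMergeLoop ps done cur)) x = (pvInP (pvFlush (done, cur)) x || pvInP ps x) := by
  intro ps
  induction ps with
  | nil => intro done cur x _ _; simp [pvMergeLoop, pvInP]
  | cons p ps ih =>
    intro done cur x hpw hcur
    obtain ⟨a, b⟩ := p
    rw [List.pairwise_cons] at hpw
    match cur with
    | none =>
      simp only [pvMergeLoop]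
      rw [ih done (some (a, b)) x hpw.2 (by intro c hc q hq; injection hc with h; subst h; exact hpw.1 q hq)]
      simp [pvFlush, pvInP, Bool.or_assoc]
    | some c =>
      have hca : c.1 < a := hcur c rfl (a, b) (List.mem_cons_self)
      simp only [pvMergeLoop]
      by_cases h1 : a < c.2
      · by_cases h2 : b > c.2
        · simp only [h1, h2, if_true]
          rw [ih done (some (c.1, b)) x hpw.2
              (by intro c' hc q hq; injection hc with h; subst h; exact lt_trans hca (hpw.1 q hq))]
          simp only [pvFlush, pvInP, List.any_cons]
          by_cases hx1 : c.1 < x <;> by_cases hx2 : x < b <;> by_cases hx3 : x < c.2 <;>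
            by_cases hx4 : a < x <;> simp [hx1, hx2, hx3, hx4] <;> omega
        · simp only [h1, h2, if_true, if_false]
          rw [ih done (some c) x hpw.2
              (by intro c' hc q hq; injection hc with h; subst h; exact lt_trans hca (hpw.1 q hq))]
          simp only [pvFlush, pvInP, List.any_cons]
          by_cases hx1 : c.1 < x <;> by_cases hx2 : x < c.2 <;> by_cases hx3 : a < x <;>
            by_cases hx4 : x < b <;> simp [hx1, hx2, hx3, hx4] <;> omega
      · simp only [h1, if_false]
        rw [ih (done ++ [c]) (some (a, b)) x hpw.2 (by intro c' hc q hq; injection hc with h; subst h; exact hpw.1 q hq)]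
        simp [pvFlush, pvInP, Bool.or_assoc]

-- ===== VERDICT (by name: the statement is the Claim_ definition above) =====
theorem index_list_remove_in_range_spec : Claim_equal_index_list_remove_in_range := by
  unfold Claim_equal_index_list_remove_in_range
  intro s idx_list range_start range_end _
  unfold Spec_index_list_remove_in_range
  unfold index_list_remove_in_range index_list_remove_in_range_alt
  by_cases hnil : idx_list = []
  · simp [hnil]
  · simp only [hnil, if_false]
    rw [pvAWhile_eq_foldl, pvFoldl_pop_eq_filter]
    have hzip : pvPairs s range_start range_end (s.length + 2) (-1) (-1) =
        List.zip (pvOccurrences s range_start) (pvOccurrences s range_end) := by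
      rw [pvPairs_eq_zip]
      norm_num [pvOccurrences]
    have hpw : List.Pairwise (fun p q : Int × Int => p.1 < q.1)
        (List.zip (pvOccurrences s range_start) (pvOccurrences s range_end)) := by
      apply pvZip_pairwise
      unfold pvOccurrences
      apply pvOccGo_pairwise
      rcases pvFindFrom_ge s range_start 0 (by omega) with h | h <;> omega
    apply List.filter_congr
    intro x _
    have hm := pvMergeLoop_sem (List.zip (pvOccurrences s range_start) (pvOccurrences s range_end))
      [] none x hpw (by intro c hc; cases hc)
    simp only [show pvFlush ([], none) = [] from rfl, pvInP, List.any_nil, Bool.false_or] at hm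
    rw [hzip]
    simp only [pvInP]
    rw [hm]
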